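-- pv_equiv track=rewrite | github.com/quantic-msse0726/policy-rag-app | eval/export_manual_review.py | latest_by_question
-- ===== SOURCE A (Python) =====
-- def latest_by_question(rows: list[dict]) -> list[dict]:
--     latest = {}
--     for r in rows:
--         qid = r.get("id", "")
--         ts = r.get("timestamp", "")
--         if qid not in latest or ts > latest[qid].get("timestamp", ""):
--             latest[qid] = r
--     return [latest[k] for k in sorted(latest.keys())]
-- ===== SOURCE B (Python) =====
-- def latest_by_question(rows: list[dict]) -> list[dict]:
--     ids = sorted({r.get("id", "") for r in rows})
--     return [max((r for r in rows if r.get("id", "") == q),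
--                 key=lambda r: r.get("timestamp", ""))
--             for q in ids]
-- ===== Notes on version B (the rewrite author's own statement) =====
-- stated objective: simpler
-- what changed: Replaces the incrementally-updated dict of running winners with a direct computation: sort the distinct ids, then pick each id's winner with a single max-by-timestamp over the matching rows (max keeps the first maximum, matching A's strict-> first-wins rule).
import Mathlib
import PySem

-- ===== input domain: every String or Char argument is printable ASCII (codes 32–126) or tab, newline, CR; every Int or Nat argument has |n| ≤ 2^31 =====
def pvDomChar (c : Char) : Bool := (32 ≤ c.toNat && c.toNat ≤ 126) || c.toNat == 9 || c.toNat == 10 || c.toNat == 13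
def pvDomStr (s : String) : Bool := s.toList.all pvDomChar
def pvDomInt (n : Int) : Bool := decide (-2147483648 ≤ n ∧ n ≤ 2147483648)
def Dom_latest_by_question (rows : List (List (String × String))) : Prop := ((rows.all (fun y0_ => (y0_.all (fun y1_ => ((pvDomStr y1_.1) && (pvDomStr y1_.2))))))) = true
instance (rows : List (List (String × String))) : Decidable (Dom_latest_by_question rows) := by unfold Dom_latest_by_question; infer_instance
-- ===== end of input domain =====

-- B replaces A's running-winner dict by sorted-distinct-ids + one max-by-timestamp per id: simpler, not faster.

-- ===== PORT A =====
-- r.get(k, "") — a row is a Python dict, represented as an association list (lookup = first match)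
def pvGet (r : List (String × String)) (k : String) : String :=
  (PySem.Dict.mk r).getD k ""

-- the body of A's loop; 'latest[qid]' is ported as 'd.getD qid []': it is only reached
-- (its Bool disjunct only decides the condition) when 'd.contains qid' is true, so the
-- default [] never determines the value of the condition — value-exact for Python's
-- short-circuit 'or'
def pvStepA (d : PySem.Dict String (List (String × String))) (r : List (String × String)) :
    PySem.Dict String (List (String × String)) :=
  let qid := pvGet r "id"
  let ts := pvGet r "timestamp"
  if !(d.contains qid) || decide (pvGet (d.getD qid []) "timestamp" < ts) then d.insert qid r else d

def latest_by_question (rows : List (List (String × String))) : List (List (String × String)) :=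
  let latest := rows.foldl pvStepA PySem.Dict.empty
  -- 'latest[k]' for k ∈ latest.keys is total: ported as getD with a default [] that is never hit
  (PySem.List.sorted latest.keys (fun k => k) false).map (fun k => latest.getD k [])

-- ===== PORT B =====
def latest_by_question_alt (rows : List (List (String × String))) : List (List (String × String)) :=
  let ids := PySem.List.sorted (PySem.Set.ofList (rows.map (fun r => pvGet r "id"))) (fun x => x) false
  -- max(...) over the rows matching q; the generator is nonempty for q ∈ ids, so the
  -- totality default [] of getD is never hit
  ids.map (fun q =>
    (PySem.List.max? (rows.filter (fun r => pvGet r "id" == q))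
      (fun r => pvGet r "timestamp")).getD [])

-- ===== PRECONDITION & SPEC =====
def Spec_latest_by_question (rows : List (List (String × String))) (out : List (List (String × String))) : Prop := out = latest_by_question_alt rows
instance (rows : List (List (String × String))) (out : List (List (String × String))) : Decidable (Spec_latest_by_question rows out) := by unfold Spec_latest_by_question; infer_instance

-- ===== CLAIM (what is proved, stated in full; the proofs are below) =====
def Claim_equal_latest_by_question : Prop := ∀ (rows : List (List (String × String))), Dom_latest_by_question rows → Spec_latest_by_question rows (latest_by_question rows)

-- ===== LEMMAS AND PROOFS =====

-- lookup invariant of A's loop: after the fold, the entry at q is exactly the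
-- first-maximal-by-timestamp row among the processed rows whose id is q
theorem pvStepA_get? (d : PySem.Dict String (List (String × String)))
    (r : List (String × String)) (q : String) :
    (pvStepA d r).get? q =
      if pvGet r "id" == q then
        (match d.get? q with
         | none => some r
         | some m => if pvGet m "timestamp" < pvGet r "timestamp" then some r else some m)
      else d.get? q := by
  unfold pvStepA
  by_cases hk : pvGet r "id" = q
  · subst hk
    simp only [beq_self_eq_true, if_true]
    cases hg : d.get? (pvGet r "id") with
    | none =>
      have hc : d.contains (pvGet r "id") = false := by
        rw [PySem.Dict.contains_eq_isSome_get?, hg]; rfl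
      simp [hc]
    | some m =>
      have hc : d.contains (pvGet r "id") = true := by
        rw [PySem.Dict.contains_eq_isSome_get?, hg]; rfl
      have hgd : d.getD (pvGet r "id") [] = m := by
        simp [PySem.Dict.getD, hg]
      by_cases ht : pvGet m "timestamp" < pvGet r "timestamp"
      · simp [hc, hgd, ht]
      · simp [hc, hgd, ht, hg]
  · have hbeq : (pvGet r "id" == q) = false := by simp [hk]
    simp only [hbeq, Bool.false_eq_true, if_false]
    split_ifs with hcond
    · rw [PySem.Dict.get?_insert]
      exact if_neg (fun h => hk h.symm)
    · rfl

theorem foldl_stepA_get? (l : List (List (String × String)))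
    (d : PySem.Dict String (List (String × String))) (q : String) :
    (l.foldl pvStepA d).get? q =
      l.foldl (fun w r =>
        if pvGet r "id" == q then
          (match w with
           | none => some r
           | some m => if pvGet m "timestamp" < pvGet r "timestamp" then some r else some m)
        else w) (d.get? q) := by
  induction l generalizing d with
  | nil => rfl
  | cons r t ih => simp only [List.foldl_cons, ih, pvStepA_get?]

-- A's final lookup at q is B's max? over the rows with id q
theorem foldl_stepA_get?_eq_max? (rows : List (List (String × String))) (q : String) :
    (rows.foldl pvStepA PySem.Dict.empty).get? q =
      PySem.List.max? (rows.filter (fun r => pvGet r "id" == q))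
        (fun r => pvGet r "timestamp") := by
  rw [foldl_stepA_get?, PySem.Dict.get?_empty, PySem.List.max?, List.foldl_filter]
  apply PySem.List.foldl_congr_mem
  intro w r _
  cases w <;> rfl

-- keys of A's dict evolve exactly like the ordered set of ids seen so far
theorem pvStepA_keys (d : PySem.Dict String (List (String × String)))
    (r : List (String × String)) :
    (pvStepA d r).keys = PySem.Set.add d.keys (pvGet r "id") := by
  by_cases hm : pvGet r "id" ∈ d.keys
  · have hc : d.contains (pvGet r "id") = true := by
      rw [PySem.Dict.contains_iff_mem_keys]; exact hm
    have hadd : PySem.Set.add d.keys (pvGet r "id") = d.keys := by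
      simp [PySem.Set.add, hm]
    unfold pvStepA
    simp only [hc]
    split_ifs with ht
    · rw [hadd, PySem.Dict.keys_insert_of_contains _ _ hc]
    · rw [hadd]
  · have hc : d.contains (pvGet r "id") = false := by
      rw [← Bool.not_eq_true, PySem.Dict.contains_iff_mem_keys]; exact hm
    unfold pvStepA
    simp only [hc, Bool.not_false, Bool.true_or, if_true]
    rw [PySem.Dict.keys_insert_of_not_contains _ _ hc]
    simp [PySem.Set.add, hm]

theorem foldl_stepA_keys (l : List (List (String × String)))
    (d : PySem.Dict String (List (String × String))) :
    (l.foldl pvStepA d).keys = PySem.Set.update d.keys (l.map (fun r => pvGet r "id")) := by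
  induction l generalizing d with
  | nil => rfl
  | cons r t ih => simp only [List.foldl_cons, ih, pvStepA_keys, List.map_cons, PySem.Set.update]

-- ===== VERDICT (by name: the statement is the Claim_ definition above) =====
theorem latest_by_question_spec : Claim_equal_latest_by_question := by
  intro rows _
  unfold Spec_latest_by_question
  show (PySem.List.sorted (rows.foldl pvStepA PySem.Dict.empty).keys (fun k => k) false).map
        (fun k => (rows.foldl pvStepA PySem.Dict.empty).getD k []) =
      (PySem.List.sorted (PySem.Set.ofList (rows.map (fun r => pvGet r "id"))) (fun x => x) false).map
        (fun q => (PySem.List.max? (rows.filter (fun r => pvGet r "id" == q))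
          (fun r => pvGet r "timestamp")).getD [])
  have hkeys : (rows.foldl pvStepA PySem.Dict.empty).keys =
      PySem.Set.ofList (rows.map (fun r => pvGet r "id")) := by
    rw [foldl_stepA_keys]; rfl
  rw [hkeys]
  apply List.map_congr_left
  intro q _
  rw [PySem.Dict.getD_eq_get?_getD, foldl_stepA_get?_eq_max?]
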